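-- pv_equiv track=rewrite | github.com/ThinGuy/papi | papi.py | parse_packages_file
-- ===== SOURCE A (Python) =====
-- def parse_packages_file(content):
--     """Parse a Packages file content and extract package information"""
--     packages = []
--     current_package = {}
--
--     for line in content.splitlines():
--         if not line.strip():
--             if current_package:
--                 packages.append(current_package)
--                 current_package = {}
--             continue
--
--         if ":" in line:
--             key, value = line.split(":", 1)
--             current_package[key.strip()] = value.strip()
--
--     # Add the last package if exists
--     if current_package:
--         packages.append(current_package)
--
--     return packages
-- ===== SOURCE B (Python) =====
-- def parse_packages_file(content):
--     """Parse a Packages file content and extract package information"""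
--     lines = content.splitlines()
--     n = len(lines)
--     records = []
--     i = 0
--     while i < n:
--         if not lines[i].strip():
--             i += 1
--             continue
--         j = i
--         while j < n and lines[j].strip():
--             j += 1
--         records.append(lines[i:j])
--         i = j
--
--     def parse(rec):
--         pkg = {}
--         for line in rec:
--             if ":" in line:
--                 key, value = line.split(":", 1)
--                 pkg[key.strip()] = value.strip()
--         return pkg
--
--     dicts = [parse(r) for r in records]
--     return [d for d in dicts if d]
-- ===== Notes on version B (the rewrite author's own statement) =====
-- stated objective: alternative
-- what changed: Replaced the single-pass flush-on-blank dict accumulator with a two-phase design: first partition the lines into records (maximal runs of non-blank lines) with an index scan, then parse each record into a dict independently and drop records whose dict is empty.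
import Mathlib
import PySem

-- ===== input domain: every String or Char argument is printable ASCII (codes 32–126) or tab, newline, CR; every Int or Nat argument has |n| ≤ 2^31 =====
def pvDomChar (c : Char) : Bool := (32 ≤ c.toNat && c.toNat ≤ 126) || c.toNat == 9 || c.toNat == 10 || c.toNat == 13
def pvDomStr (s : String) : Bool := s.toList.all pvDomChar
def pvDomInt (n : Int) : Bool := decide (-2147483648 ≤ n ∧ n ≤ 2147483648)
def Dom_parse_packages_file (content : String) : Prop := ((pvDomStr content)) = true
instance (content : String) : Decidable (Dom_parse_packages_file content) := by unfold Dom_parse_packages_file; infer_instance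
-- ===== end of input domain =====

-- B replaces A's single-pass flush-on-blank accumulator with a two-phase decomposition
-- (group the lines into records, then parse each record); alternative structure, same cost.

-- ===== PORT A =====
-- one line of A's loop body: add 'key.strip(): value.strip()' if the line contains ':'
def pvLineUpdA (d : PySem.Dict String String) (line : String) : PySem.Dict String String :=
  if PySem.Str.isIn ":" line then
    match PySem.Str.splitMax? line ":" 1 with
    | some (key :: value :: _) => d.insert (PySem.Str.strip key) (PySem.Str.strip value)
    | _ => d          -- unreachable: ':' ∈ line gives two pieces
  else d

-- A's loop body over the state (packages, current_package)
def pvStepA (st : List (List (String × String)) × PySem.Dict String String) (line : String) :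
    List (List (String × String)) × PySem.Dict String String :=
  if PySem.Str.strip line = "" then
    if st.2.items.isEmpty then st else (st.1 ++ [st.2.items], PySem.Dict.empty)
  else (st.1, pvLineUpdA st.2 line)

def parse_packages_file (content : String) : List (List (String × String)) :=
  let st := (PySem.Str.splitlines content).foldl pvStepA ([], PySem.Dict.empty)
  if st.2.items.isEmpty then st.1 else st.1 ++ [st.2.items]

-- ===== PORT B =====
-- B phase 1: the two index-scanning while loops, as recursion on the line list
def pvRecords : List String → List (List String)
  | [] => []
  | l :: ls =>
    if PySem.Str.strip l = "" then pvRecords ls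
    else (l :: ls.takeWhile (fun x => PySem.Str.strip x ≠ "")) ::
         pvRecords (ls.dropWhile (fun x => PySem.Str.strip x ≠ ""))
termination_by ls => ls.length
decreasing_by
  · simp
  · exact Nat.lt_succ_of_le (List.length_dropWhile_le _ _)

-- B phase 2: parse one record into a dict (same per-line rule as A's loop body)
def pvLineUpdB (d : PySem.Dict String String) (line : String) : PySem.Dict String String :=
  if PySem.Str.isIn ":" line then
    match PySem.Str.splitMax? line ":" 1 with
    | some (key :: value :: _) => d.insert (PySem.Str.strip key) (PySem.Str.strip value)
    | _ => d
  else d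

def pvParseRec (r : List String) : List (String × String) :=
  (r.foldl pvLineUpdB PySem.Dict.empty).items

def parse_packages_file_alt (content : String) : List (List (String × String)) :=
  (((pvRecords (PySem.Str.splitlines content)).map pvParseRec).filter (fun d => !d.isEmpty))

-- ===== PRECONDITION & SPEC =====
def Spec_parse_packages_file (content : String) (out : List (List (String × String))) : Prop := out = parse_packages_file_alt content
instance (content : String) (out : List (List (String × String))) : Decidable (Spec_parse_packages_file content out) := by unfold Spec_parse_packages_file; infer_instance

-- ===== CLAIM (what is proved, stated in full; the proofs are below) =====
def Claim_equal_parse_packages_file : Prop := ∀ (content : String), Dom_parse_packages_file content → Spec_parse_packages_file content (parse_packages_file content)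

-- ===== LEMMAS AND PROOFS =====

-- common description of what remains to be emitted from state 'cur' over the remaining lines
def pvEmit (cur : PySem.Dict String String) : List String → List (List (String × String))
  | [] => if cur.items.isEmpty then [] else [cur.items]
  | l :: ls =>
    if PySem.Str.strip l = "" then
      (if cur.items.isEmpty then [] else [cur.items]) ++ pvEmit PySem.Dict.empty ls
    else pvEmit (pvLineUpdA cur l) ls

lemma pvDict_empty_of_items_nil (d : PySem.Dict String String) (h : d.items.isEmpty = true) :
    d = PySem.Dict.empty := by
  apply PySem.Dict.ext
  simpa [List.isEmpty_iff, PySem.Dict.empty] using h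

lemma A_eq_emit (ls : List String) :
    ∀ (pkgs : List (List (String × String))) (cur : PySem.Dict String String),
      (let st := ls.foldl pvStepA (pkgs, cur)
       if st.2.items.isEmpty then st.1 else st.1 ++ [st.2.items]) = pkgs ++ pvEmit cur ls := by
  induction ls with
  | nil =>
    intro pkgs cur
    simp only [List.foldl_nil, pvEmit]
    split <;> simp
  | cons l ls ih =>
    intro pkgs cur
    simp only [List.foldl_cons, pvEmit, pvStepA]
    by_cases hb : PySem.Str.strip l = ""
    · simp only [hb, if_true]
      by_cases he : cur.items.isEmpty
      · rw [pvDict_empty_of_items_nil cur he] at *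
        simp only [he, if_true]
        simpa using ih pkgs PySem.Dict.empty
      · simp only [he, Bool.false_eq_true, if_false]
        rw [ih (pkgs ++ [cur.items]) PySem.Dict.empty]
        simp
    · simp only [hb]
      exact ih pkgs (pvLineUpdA cur l)

lemma emit_spec (ls : List String) :
    ∀ (cur : PySem.Dict String String),
      pvEmit cur ls =
        (let d := (ls.takeWhile (fun x => PySem.Str.strip x ≠ "")).foldl pvLineUpdA cur
         if d.items.isEmpty then [] else [d.items]) ++
        pvEmit PySem.Dict.empty (ls.dropWhile (fun x => PySem.Str.strip x ≠ "")) := by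
  induction ls with
  | nil =>
    intro cur
    simp [pvEmit, PySem.Dict.empty]
  | cons l ls ih =>
    intro cur
    by_cases hb : PySem.Str.strip l = ""
    · have htw : (l :: ls).takeWhile (fun x => PySem.Str.strip x ≠ "") = [] := by
        simp [hb]
      have hdw : (l :: ls).dropWhile (fun x => PySem.Str.strip x ≠ "") = l :: ls := by
        simp [hb]
      rw [htw, hdw]
      simp only [List.foldl_nil]
      conv_rhs => rw [pvEmit]
      simp [pvEmit, hb, PySem.Dict.empty]
    · have htw : (l :: ls).takeWhile (fun x => PySem.Str.strip x ≠ "") =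
          l :: ls.takeWhile (fun x => PySem.Str.strip x ≠ "") := by
        simp [hb]
      have hdw : (l :: ls).dropWhile (fun x => PySem.Str.strip x ≠ "") =
          ls.dropWhile (fun x => PySem.Str.strip x ≠ "") := by
        simp [hb]
      rw [htw, hdw]
      simp only [pvEmit, hb, List.foldl_cons]
      exact ih (pvLineUpdA cur l)

lemma updB_eq_updA : pvLineUpdB = pvLineUpdA := rfl

lemma B_eq_emit (ls : List String) :
    pvEmit PySem.Dict.empty ls = ((pvRecords ls).map pvParseRec).filter (fun d => !d.isEmpty) := by
  induction ls using pvRecords.induct with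
  | case1 => simp [pvEmit, pvRecords, PySem.Dict.empty]
  | case2 l ls hb ih =>
    rw [pvRecords]
    simp only [hb, if_true, pvEmit, PySem.Dict.empty]
    simpa [pvEmit, hb, PySem.Dict.empty] using ih
  | case3 l ls hb ih =>
    rw [pvRecords, if_neg hb]
    rw [pvEmit, if_neg hb]
    rw [emit_spec]
    simp only [List.map_cons, List.filter_cons, pvParseRec, updB_eq_updA, List.foldl_cons]
    rw [ih]
    split_ifs with he h2 <;> simp_all

-- ===== VERDICT (by name: the statement is the Claim_ definition above) =====
theorem parse_packages_file_spec : Claim_equal_parse_packages_file := by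
  intro content _
  unfold Spec_parse_packages_file parse_packages_file parse_packages_file_alt
  rw [A_eq_emit (PySem.Str.splitlines content) [] PySem.Dict.empty]
  rw [B_eq_emit]
  simp
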